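-- pv_equiv track=rewrite | github.com/habibin/CS362-TestingTechnique | task.py | make_end_str
-- ===== SOURCE A (Python) =====
-- def make_end_str(list_of_bytes):
--     list_of_bytes.reverse()
--     counter = 0
--     end_string = ""
--     for i in range(len(list_of_bytes)):
--         end_string += list_of_bytes[i]
--         counter += 1
--         if counter == 2:
--             counter = 0
--             end_string += " "
--     return end_string
-- ===== SOURCE B (Python) =====
-- def make_end_str(list_of_bytes):
--     list_of_bytes.reverse()
--     parts = []
--     for i in range(0, len(list_of_bytes), 2):
--         chunk = list_of_bytes[i:i+2]
--         if len(chunk) == 2: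
--             parts.append(chunk[0])
--             parts.append(chunk[1])
--             parts.append(" ")
--         else:
--             parts.append(chunk[0])
--     return "".join(parts)
-- ===== Notes on version B (the rewrite author's own statement) =====
-- stated objective: alternative
-- what changed: Replaces the per-element counter/accumulator loop with stepping by two over pair-slices of the reversed list, collecting parts and joining once.
import Mathlib
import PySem

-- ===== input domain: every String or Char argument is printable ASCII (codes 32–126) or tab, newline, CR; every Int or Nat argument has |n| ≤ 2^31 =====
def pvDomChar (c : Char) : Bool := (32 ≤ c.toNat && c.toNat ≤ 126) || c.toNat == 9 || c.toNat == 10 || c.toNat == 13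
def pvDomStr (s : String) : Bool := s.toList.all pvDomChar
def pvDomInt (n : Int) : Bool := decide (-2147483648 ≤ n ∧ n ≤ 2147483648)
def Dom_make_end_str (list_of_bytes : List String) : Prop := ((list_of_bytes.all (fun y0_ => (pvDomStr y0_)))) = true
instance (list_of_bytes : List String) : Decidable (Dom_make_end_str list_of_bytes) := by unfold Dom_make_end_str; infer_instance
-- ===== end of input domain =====

-- B steps by two over pair-slices of the reversed list and joins the parts, instead of A's
-- per-element counter loop; same argument mutation in Python (reverse in place), return value proved equal.
-- ===== PORT A =====
def make_end_str (list_of_bytes : List String) : String :=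
  let rev := list_of_bytes.reverse
  -- for i in range(len(rev)): end_string += rev[i]; counter += 1; if counter == 2: counter = 0; end_string += " "
  (rev.foldl (fun (st : Int × String) x =>
      let end_string := st.2 ++ x
      let counter := st.1 + 1
      if counter == 2 then (0, end_string ++ " ") else (counter, end_string))
    (0, "")).2

-- ===== PORT B =====
-- one step per pair-slice chunk = rev[i:i+2]: two elements -> both plus a space, one -> just it
def pvPartsB : List String → List String
  | [] => []
  | [x] => [x]
  | x :: y :: rest => x :: y :: " " :: pvPartsB rest

def make_end_str_alt (list_of_bytes : List String) : String :=
  String.join (pvPartsB list_of_bytes.reverse)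

-- ===== PRECONDITION & SPEC =====
def Spec_make_end_str (list_of_bytes : List String) (out : String) : Prop := out = make_end_str_alt list_of_bytes
instance (list_of_bytes : List String) (out : String) : Decidable (Spec_make_end_str list_of_bytes out) := by unfold Spec_make_end_str; infer_instance

-- ===== CLAIM (what is proved, stated in full; the proofs are below) =====
def Claim_equal_make_end_str : Prop := ∀ (list_of_bytes : List String), Dom_make_end_str list_of_bytes → Spec_make_end_str list_of_bytes (make_end_str list_of_bytes)

-- ===== LEMMAS AND PROOFS =====
theorem pvJoin_foldl (l : List String) : ∀ acc : String,
    List.foldl (· ++ ·) acc l = acc ++ String.join l := by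
  induction l with
  | nil => intro acc; simp [String.join]
  | cons a l ih =>
      intro acc
      rw [List.foldl_cons, ih]
      conv_rhs => rw [String.join, List.foldl_cons, ih]
      simp [String.append_assoc]

theorem pvJoin_cons (a : String) (l : List String) :
    String.join (a :: l) = a ++ String.join l := by
  show List.foldl (· ++ ·) ("" ++ a) l = a ++ String.join l
  simp [pvJoin_foldl]

theorem pvLoopA_eq (l : List String) : ∀ acc : String,
    (l.foldl (fun (st : Int × String) x =>
      let end_string := st.2 ++ x
      let counter := st.1 + 1
      if counter == 2 then (0, end_string ++ " ") else (counter, end_string))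
      (0, acc)).2 = acc ++ String.join (pvPartsB l) := by
  induction l using pvPartsB.induct with
  | case1 => intro acc; simp [String.join, pvPartsB]
  | case2 x => intro acc; simp [pvPartsB, String.join]
  | case3 x y rest ih =>
      intro acc
      have h := ih (acc ++ x ++ y ++ " ")
      simp only [List.foldl_cons] at h ⊢
      norm_num at h ⊢
      rw [h, pvPartsB, pvJoin_cons, pvJoin_cons, pvJoin_cons]
      simp [String.append_assoc]

-- ===== VERDICT (by name: the statement is the Claim_ definition above) =====
theorem make_end_str_spec : Claim_equal_make_end_str := by
  intro l _
  unfold Spec_make_end_str make_end_str make_end_str_alt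
  simpa using pvLoopA_eq l.reverse ""
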